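-- pv_equiv track=rewrite | github.com/mbaocha/dialogcart | src/intents/core/validator.py | normalize_action_with_synonyms
-- ===== SOURCE A (Python) =====
-- from typing import Dict, List, Any, Set
--
-- def normalize_action_with_synonyms(word: str, filtered_synonyms: Dict[str, List[str]]) -> str:
--     """Normalize action using only filtered synonyms."""
--     w = word.lower().strip()
--
--     # Exact synonym match
--     for action, synonyms in filtered_synonyms.items():
--         for syn in synonyms:
--             if w == syn.lower().strip():
--                 return action
--
--     # Prefix match (inflections like "adding")
--     for action, synonyms in filtered_synonyms.items():
--         for syn in synonyms:
--             if w.startswith(syn.lower().strip()):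
--                 return action
--
--     return "unknown"
-- ===== SOURCE B (Python) =====
-- def normalize_action_with_synonyms(word, filtered_synonyms):
--     """Single pass: early-return on first exact match, remember first prefix match."""
--     w = word.lower().strip()
--     first_prefix = None
--     for action, synonyms in filtered_synonyms.items():
--         for syn in synonyms:
--             s = syn.lower().strip()
--             if w == s:
--                 return action
--             if first_prefix is None and w.startswith(s):
--                 first_prefix = action
--     return first_prefix if first_prefix is not None else "unknown"
-- ===== Notes on version B (the rewrite author's own statement) =====
-- stated objective: alternative
-- what changed: Collapses A's two sequential full scans (exact pass, then prefix pass) into one nested pass that early-returns on the first exact match and remembers the first prefix match in an accumulator.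
import Mathlib
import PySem

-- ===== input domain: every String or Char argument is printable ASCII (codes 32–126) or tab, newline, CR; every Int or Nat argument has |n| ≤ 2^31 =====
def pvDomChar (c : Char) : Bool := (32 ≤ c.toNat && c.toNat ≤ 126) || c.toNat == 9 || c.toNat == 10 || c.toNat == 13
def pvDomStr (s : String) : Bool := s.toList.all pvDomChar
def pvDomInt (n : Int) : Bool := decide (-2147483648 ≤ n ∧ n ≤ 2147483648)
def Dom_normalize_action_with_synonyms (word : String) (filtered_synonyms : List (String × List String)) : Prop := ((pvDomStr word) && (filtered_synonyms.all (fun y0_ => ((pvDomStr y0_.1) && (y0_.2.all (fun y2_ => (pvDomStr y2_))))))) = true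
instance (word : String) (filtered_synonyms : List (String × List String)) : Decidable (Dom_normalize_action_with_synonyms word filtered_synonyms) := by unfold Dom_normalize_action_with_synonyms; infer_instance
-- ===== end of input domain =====

-- B merges A's two sequential scans (exact pass then prefix pass) into one nested pass
-- with an early return on exact match and a first-prefix accumulator. Return values agree everywhere.

-- shared normalization: s.lower().strip()
def pyNormSyn (s : String) : String := PySem.Str.strip (PySem.Str.lower s)

-- ===== PORT A =====
-- first pass: exact synonym match
def pvExactLoop (w : String) : List (String × List String) → Option String
  | [] => none
  | (a, syns) :: rest =>
    if syns.any (fun syn => w == pyNormSyn syn) then some a else pvExactLoop w rest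

-- second pass: prefix match
def pvPrefixLoop (w : String) : List (String × List String) → Option String
  | [] => none
  | (a, syns) :: rest =>
    if syns.any (fun syn => PySem.Str.startswith w (pyNormSyn syn)) then some a
    else pvPrefixLoop w rest

def normalize_action_with_synonyms (word : String) (filtered_synonyms : List (String × List String)) : String :=
  let w := pyNormSyn word
  match pvExactLoop w filtered_synonyms with
  | some a => a
  | none =>
    match pvPrefixLoop w filtered_synonyms with
    | some a => a
    | none => "unknown"

-- ===== PORT B =====
-- inner loop over one action's synonyms: (early exact return, updated first_prefix)
def pvInnerB (w a : String) (fp : Option String) : List String → Option String × Option String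
  | [] => (none, fp)
  | syn :: rest =>
    let s := pyNormSyn syn
    if w == s then (some a, fp)
    else pvInnerB w a (if fp.isNone && PySem.Str.startswith w s then some a else fp) rest

def pvLoopB (w : String) (fp : Option String) : List (String × List String) → String
  | [] => fp.getD "unknown"
  | (a, syns) :: rest =>
    match pvInnerB w a fp syns with
    | (some r, _) => r
    | (none, fp') => pvLoopB w fp' rest

def normalize_action_with_synonyms_alt (word : String) (filtered_synonyms : List (String × List String)) : String :=
  pvLoopB (pyNormSyn word) none filtered_synonyms

-- ===== PRECONDITION & SPEC =====
def Spec_normalize_action_with_synonyms (word : String) (filtered_synonyms : List (String × List String)) (out : String) : Prop := out = normalize_action_with_synonyms_alt word filtered_synonyms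
instance (word : String) (filtered_synonyms : List (String × List String)) (out : String) : Decidable (Spec_normalize_action_with_synonyms word filtered_synonyms out) := by unfold Spec_normalize_action_with_synonyms; infer_instance

-- ===== CLAIM (what is proved, stated in full; the proofs are below) =====
def Claim_equal_normalize_action_with_synonyms : Prop := ∀ (word : String) (filtered_synonyms : List (String × List String)), Dom_normalize_action_with_synonyms word filtered_synonyms → Spec_normalize_action_with_synonyms word filtered_synonyms (normalize_action_with_synonyms word filtered_synonyms)

-- ===== LEMMAS AND PROOFS =====

theorem pvInnerB_fst (w a : String) (syns : List String) : ∀ fp,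
    (pvInnerB w a fp syns).1 = if syns.any (fun s => w == pyNormSyn s) then some a else none := by
  induction syns with
  | nil => intro fp; simp [pvInnerB]
  | cons syn rest ih =>
    intro fp
    by_cases h : w == pyNormSyn syn
    · simp [pvInnerB, h]
    · have h' : (w == pyNormSyn syn) = false := by simpa using h
      simp only [pvInnerB, h', Bool.false_eq_true, if_false, List.any_cons, Bool.false_or]
      exact ih _

theorem pvInnerB_snd (w a : String) (syns : List String)
    (hne : syns.any (fun s => w == pyNormSyn s) = false) : ∀ fp,
    (pvInnerB w a fp syns).2 =
      fp.or (if syns.any (fun s => PySem.Str.startswith w (pyNormSyn s)) then some a else none) := by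
  induction syns with
  | nil => intro fp; cases fp <;> simp [pvInnerB, Option.or]
  | cons syn rest ih =>
    simp only [List.any_cons, Bool.or_eq_false_iff] at hne
    intro fp
    simp only [pvInnerB, hne.1, Bool.false_eq_true, if_false]
    rw [ih hne.2]
    cases fp with
    | some x => simp [Option.or]
    | none =>
      simp only [PySem.Str.startswith_eq]
      by_cases hs : PySem.Chars.startswith w.toList (pyNormSyn syn).toList = true
      · simp [hs, Option.or]
      · simp only [Bool.not_eq_true] at hs
        simp [hs, Option.or]

theorem pvLoopB_eq (w : String) (l : List (String × List String)) : ∀ fp,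
    pvLoopB w fp l =
      match pvExactLoop w l with
      | some a => a
      | none => (fp.or (pvPrefixLoop w l)).getD "unknown" := by
  induction l with
  | nil => intro fp; cases fp <;> simp [pvLoopB, pvExactLoop, pvPrefixLoop, Option.or]
  | cons p rest ih =>
    intro fp
    obtain ⟨a, syns⟩ := p
    by_cases hex : syns.any (fun s => w == pyNormSyn s)
    · have h1 := pvInnerB_fst w a syns fp
      rw [hex, if_pos rfl] at h1
      simp only [pvLoopB, pvExactLoop, hex, if_true]
      rcases heq : pvInnerB w a fp syns with ⟨f, fp'⟩
      rw [heq] at h1; simp at h1; subst h1; rfl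
    · simp only [Bool.not_eq_true] at hex
      have h1 := pvInnerB_fst w a syns fp
      have h2 := pvInnerB_snd w a syns hex fp
      rw [hex, if_neg (by simp)] at h1
      have hpair : pvInnerB w a fp syns =
          (none, fp.or (if syns.any (fun s => PySem.Str.startswith w (pyNormSyn s)) then some a
                        else none)) := by
        rw [Prod.ext_iff]; exact ⟨h1, h2⟩
      simp only [pvLoopB, pvExactLoop, pvPrefixLoop, hex, Bool.false_eq_true, if_false, hpair]
      refine (ih _).trans ?_
      rcases hE : pvExactLoop w rest with _ | b <;> simp only [hE]
      · congr 1
        by_cases hp : (syns.any fun s => PySem.Str.startswith w (pyNormSyn s)) = true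
        · cases fp <;> simp only [hp] <;> simp [Option.or]
        · simp only [Bool.not_eq_true] at hp
          cases fp <;> simp only [hp] <;> simp [Option.or]

-- ===== VERDICT (by name: the statement is the Claim_ definition above) =====
theorem normalize_action_with_synonyms_spec : Claim_equal_normalize_action_with_synonyms := by
  intro word fs _
  unfold Spec_normalize_action_with_synonyms normalize_action_with_synonyms normalize_action_with_synonyms_alt
  rw [pvLoopB_eq]
  rcases hE : pvExactLoop (pyNormSyn word) fs with _ | a <;> simp only [hE]
  rcases hP : pvPrefixLoop (pyNormSyn word) fs with _ | b <;> simp [Option.or]
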